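-- pv_equiv track=rewrite | github.com/xfx1337/inf146 | ege0510/5.py | f
-- ===== SOURCE A (Python) =====
-- def f(N):
--     bN = bin(N)[2:]
--     sm = 0
--     for d in bN:
--         sm += int(d)
--     if sm % 4 == 0:
--         bN = "10" + bN
--     else:
--         bN = "11" + bN
--     if (int(bN, 2)) % 2 == 0:
--         bN = bN + "1"
--     else:
--         bN = bN + "0"
--     return int(bN, 2)
-- ===== SOURCE B (Python) =====
-- def f(N):
--     L = max(N.bit_length(), 1)
--     prefix = 2 if N.bit_count() % 4 == 0 else 3
--     val = (prefix << L) + N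
--     return val * 2 + (1 if val % 2 == 0 else 0)
-- ===== Notes on version B (the rewrite author's own statement) =====
-- stated objective: simpler
-- what changed: B replaces the bit-string build, per-character digit loop and int(...) re-parses with integer arithmetic: bit_length and bit_count choose the prefix, which is shifted in and added, and the parity bit is appended by doubling and adding.
import Mathlib
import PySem

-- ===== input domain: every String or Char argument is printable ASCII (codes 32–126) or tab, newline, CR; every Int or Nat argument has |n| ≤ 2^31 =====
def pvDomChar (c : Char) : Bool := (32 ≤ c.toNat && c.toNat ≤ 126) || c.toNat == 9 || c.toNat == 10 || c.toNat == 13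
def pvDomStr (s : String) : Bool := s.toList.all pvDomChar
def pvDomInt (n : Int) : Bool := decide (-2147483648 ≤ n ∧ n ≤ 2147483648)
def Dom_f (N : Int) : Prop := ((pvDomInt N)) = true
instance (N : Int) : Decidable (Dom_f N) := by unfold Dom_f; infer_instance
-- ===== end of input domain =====

-- B builds the result by integer arithmetic (bit_length/bit_count/shift) instead of
-- concatenating a bit string and re-parsing it; objective: simpler.

-- ===== PORT A =====
-- Hand port: the binary string bin(n)[2:] (chars '0'/'1') is represented exactly as a
-- List Nat of bits, most significant first; int(s, 2) is the fold pvParseA.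
def pvBitsA (n : Nat) : List Nat :=
  if n = 0 then [] else pvBitsA (n / 2) ++ [n % 2]

def pvParseA (ds : List Nat) : Nat := ds.foldl (fun a d => 2 * a + d) 0

def f (N : Int) : Int :=
  let n := N.toNat              -- Pre_f restricts to 0 ≤ N (A raises ValueError on N < 0)
  let bN : List Nat := if n = 0 then [0] else pvBitsA n   -- bin(N)[2:] (one digit when n vanishes)
  let sm : Nat := bN.foldl (· + ·) 0                      -- the digit-summing for-loop
  let bN2 : List Nat := (if sm % 4 = 0 then [1, 0] else [1, 1]) ++ bN
  let bN3 : List Nat := if pvParseA bN2 % 2 = 0 then bN2 ++ [1] else bN2 ++ [0]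
  (pvParseA bN3 : Int)

-- ===== PORT B =====
-- N.bit_length() (exact for N ≥ 0)
def pvBitLen (n : Nat) : Nat :=
  if n = 0 then 0 else pvBitLen (n / 2) + 1

-- N.bit_count() (exact for N ≥ 0)
def pvPopcount (n : Nat) : Nat :=
  if n = 0 then 0 else pvPopcount (n / 2) + n % 2

def f_alt (N : Int) : Int :=
  let n := N.toNat              -- Pre_f restricts to 0 ≤ N
  let L := max (pvBitLen n) 1
  let pfx : Nat := if pvPopcount n % 4 = 0 then 2 else 3
  let val : Nat := pfx <<< L + n
  ((val * 2 + (if val % 2 = 0 then 1 else 0) : Nat) : Int)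

-- ===== PRECONDITION & SPEC =====
-- Pre_f excludes exactly N < 0, where A raises ValueError (bin(N) starts with '-0b' there).
def Pre_f (N : Int) : Prop := 0 ≤ N
instance (N : Int) : Decidable (Pre_f N) := by unfold Pre_f; infer_instance
def pvWitness_f : Int := (6)

def Spec_f (N : Int) (out : Int) : Prop := out = f_alt N
instance (N : Int) (out : Int) : Decidable (Spec_f N out) := by unfold Spec_f; infer_instance

-- ===== CLAIM (what is proved, stated in full; the proofs are below) =====
def Claim_equal_f : Prop := ∀ (N : Int), Dom_f N → Pre_f N → Spec_f N (f N)

-- ===== LEMMAS AND PROOFS =====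

theorem pvParseA_foldl (ys : List Nat) (a : Nat) :
    ys.foldl (fun a d => 2 * a + d) a = a * 2 ^ ys.length + pvParseA ys := by
  induction ys generalizing a with
  | nil => simp [pvParseA]
  | cons d ys ih =>
      simp only [List.foldl_cons, List.length_cons, pvParseA] at *
      rw [ih (2 * a + d), ih (2 * 0 + d)]
      ring

theorem pvParseA_append (xs ys : List Nat) :
    pvParseA (xs ++ ys) = pvParseA xs * 2 ^ ys.length + pvParseA ys := by
  unfold pvParseA
  rw [List.foldl_append, pvParseA_foldl]
  rfl

theorem pvParseA_bits (n : Nat) : pvParseA (pvBitsA n) = n := by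
  induction n using Nat.strong_induction_on with
  | _ n ih =>
      rw [pvBitsA]
      by_cases h : n = 0
      · simp [h, pvParseA]
      · rw [if_neg h, pvParseA_append,
          ih (n / 2) (Nat.div_lt_self (Nat.pos_of_ne_zero h) one_lt_two)]
        simp [pvParseA]
        omega

theorem pvBitsA_length (n : Nat) : (pvBitsA n).length = pvBitLen n := by
  induction n using Nat.strong_induction_on with
  | _ n ih =>
      rw [pvBitsA, pvBitLen]
      by_cases h : n = 0
      · simp [h]
      · rw [if_neg h, if_neg h]
        simp [ih (n / 2) (Nat.div_lt_self (Nat.pos_of_ne_zero h) one_lt_two)]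

theorem pvSum_foldl (ys : List Nat) (a : Nat) :
    ys.foldl (· + ·) a = a + ys.foldl (· + ·) 0 := by
  induction ys generalizing a with
  | nil => simp
  | cons d ys ih =>
      simp only [List.foldl_cons]
      rw [ih (a + d), ih (0 + d)]
      omega

theorem pvBitsA_sum (n : Nat) : (pvBitsA n).foldl (· + ·) 0 = pvPopcount n := by
  induction n using Nat.strong_induction_on with
  | _ n ih =>
      rw [pvBitsA, pvPopcount]
      by_cases h : n = 0
      · simp [h]
      · rw [if_neg h, List.foldl_append, pvSum_foldl,
          ih (n / 2) (Nat.div_lt_self (Nat.pos_of_ne_zero h) one_lt_two), if_neg h]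
        simp

theorem pvBitLen_pos (n : Nat) (h : n ≠ 0) : 1 ≤ pvBitLen n := by
  rw [pvBitLen, if_neg h]; omega

theorem f_key (n : Nat) :
    (let bN : List Nat := if n = 0 then [0] else pvBitsA n
     let sm : Nat := bN.foldl (· + ·) 0
     let bN2 : List Nat := (if sm % 4 = 0 then [1, 0] else [1, 1]) ++ bN
     let bN3 : List Nat := if pvParseA bN2 % 2 = 0 then bN2 ++ [1] else bN2 ++ [0]
     pvParseA bN3)
    = (let L := max (pvBitLen n) 1
       let pfx : Nat := if pvPopcount n % 4 = 0 then 2 else 3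
       let val : Nat := pfx <<< L + n
       val * 2 + (if val % 2 = 0 then 1 else 0)) := by
  simp only []
  set bN : List Nat := if n = 0 then [0] else pvBitsA n with hbN
  have hparse : pvParseA bN = n := by
    by_cases h : n = 0
    · simp [hbN, h, pvParseA]
    · rw [hbN, if_neg h, pvParseA_bits]
  have hlen : 2 ^ bN.length = 2 ^ max (pvBitLen n) 1 := by
    by_cases h : n = 0
    · simp [hbN, h, pvBitLen]
    · rw [hbN, if_neg h, pvBitsA_length, Nat.max_eq_left (pvBitLen_pos n h)]
  have hsum : bN.foldl (· + ·) 0 = pvPopcount n := by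
    by_cases h : n = 0
    · simp [hbN, h, pvPopcount]
    · rw [hbN, if_neg h, pvBitsA_sum]
  have hmid : pvParseA ((if pvPopcount n % 4 = 0 then [1, 0] else [1, 1]) ++ bN)
      = (if pvPopcount n % 4 = 0 then 2 else 3) <<< max (pvBitLen n) 1 + n := by
    rw [pvParseA_append, hparse, Nat.shiftLeft_eq, ← hlen]
    by_cases h4 : pvPopcount n % 4 = 0 <;> simp [h4, pvParseA]
  have hlast : ∀ (xs : List Nat) (b : Nat), pvParseA (xs ++ [b]) = pvParseA xs * 2 + b := by
    intro xs b
    rw [pvParseA_append]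
    simp [pvParseA]
  rw [hsum]
  by_cases h4 : pvPopcount n % 4 = 0
  · simp only [if_pos h4] at hmid ⊢
    rw [hmid]
    split_ifs with h2 <;> rw [hlast, hmid]
  · simp only [if_neg h4] at hmid ⊢
    rw [hmid]
    split_ifs with h2 <;> rw [hlast, hmid]

-- ===== VERDICT (by name: the statement is the Claim_ definition above) =====
theorem f_spec : Claim_equal_f := by
  intro N _ _
  unfold Spec_f f f_alt
  simp only []
  exact_mod_cast f_key N.toNat
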